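-- pv_equiv track=rewrite | github.com/Jacksonxhx/leetcodePractice | 2456-most-popular-video-creator/2456-most-popular-video-creator.py | mostPopularCreator
-- ===== SOURCE A (Python) =====
-- from collections import defaultdict
-- from typing import List
--
-- def mostPopularCreator(creators: List[str], ids: List[str], views: List[int]) -> List[List[str]]:
--     '''
--     使用哈希表记录每个创作者的总播放量及最受欢迎的视频
--     '''
--     n = len(creators)
--     creator_stats = defaultdict(lambda: [0, "", float("-inf")])  # 初始化为[总播放量, 最火视频ID, 最火视频播放量]
--
--     for i in range(n):
--         creator = creators[i]
--         video_id = ids[i]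
--         view_count = views[i]
--
--         # 更新总播放量
--         creator_stats[creator][0] += view_count
--
--         # 更新最受欢迎的视频ID和播放量
--         if view_count > creator_stats[creator][2]:
--             creator_stats[creator][1] = video_id
--             creator_stats[creator][2] = view_count
--         elif view_count == creator_stats[creator][2] and video_id < creator_stats[creator][1]:
--             creator_stats[creator][1] = video_id
--
--     # 找到总播放量最高的创作者
--     max_views = max(stat[0] for stat in creator_stats.values())
--     res = []
--
--     for creator, stat in creator_stats.items():
--         if stat[0] == max_views:
--             res.append([creator, stat[1]])
--
--     return res
-- ===== SOURCE B (Python) =====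
-- def mostPopularCreator(creators, ids, views):
--     # Group-by formulation: unique creators in first-appearance order, then
--     # per-creator scans (a sum and a tuple-min) instead of a fused dict of triples.
--     order = list(dict.fromkeys(creators))
--     totals = [sum(v for c2, v in zip(creators, views) if c2 == c) for c in order]
--     max_views = max(totals)
--     res = []
--     for c, t in zip(order, totals):
--         if t == max_views:
--             best = min((-v, vid) for c2, vid, v in zip(creators, ids, views) if c2 == c)
--             res.append([c, best[1]])
--     return res
-- ===== Notes on version B (the rewrite author's own statement) =====
-- stated objective: alternative
-- what changed: A's single pass maintaining a dict of mutable [total, best_id, best_view] triples is replaced by a group-by formulation with no such dict: dedup the creators in first-appearance order, compute each creator's total by a per-creator sum over the zipped lists, take the max, and for each maximal creator pick its video as a tuple-min of (-view, id) over its own entries.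
import Mathlib
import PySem

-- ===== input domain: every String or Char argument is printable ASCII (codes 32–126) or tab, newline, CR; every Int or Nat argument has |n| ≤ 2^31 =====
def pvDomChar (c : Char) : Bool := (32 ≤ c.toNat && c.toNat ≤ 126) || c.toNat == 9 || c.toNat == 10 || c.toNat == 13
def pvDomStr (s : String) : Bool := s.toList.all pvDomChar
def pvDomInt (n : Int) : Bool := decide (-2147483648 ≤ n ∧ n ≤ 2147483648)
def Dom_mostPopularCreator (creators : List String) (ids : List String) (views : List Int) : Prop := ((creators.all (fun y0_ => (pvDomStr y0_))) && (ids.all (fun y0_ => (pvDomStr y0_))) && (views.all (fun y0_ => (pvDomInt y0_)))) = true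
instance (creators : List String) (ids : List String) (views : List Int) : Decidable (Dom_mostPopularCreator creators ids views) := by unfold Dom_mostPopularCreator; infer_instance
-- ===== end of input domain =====

-- B drops A's single pass over a dict of mutable [total, best_id, best_view] triples and instead
-- groups by creator: dedup the creators in first-appearance order, per-creator sums, max, and a
-- tuple-min of (-view, id) per maximal creator (objective: alternative, not faster).

-- ===== PORT A =====
-- A's loop body. The defaultdict value [total, best_id, best_view] starts with
-- best_view = float("-inf"); ported as Option Int with none = -inf, which is exact here because
-- the views are ints: v > -inf is always true and v == -inf always false.
def pvStatsStep (d : PySem.Dict String (Int × String × Option Int)) (c vid : String) (v : Int) :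
    PySem.Dict String (Int × String × Option Int) :=
  let s0 := d.getD c (0, "", none)
  let total := s0.1 + v
  let best : String × Option Int :=
    match s0.2.2 with
    | none => (vid, some v)                       -- view_count > -inf
    | some m =>
      if m < v then (vid, some v)
      else if v = m ∧ vid < s0.2.1 then (vid, some m)
      else (s0.2.1, some m)
  d.insert c (total, best.1, best.2)

def mostPopularCreator (creators : List String) (ids : List String) (views : List Int) : List (List String) :=
  let n : Int := (creators.length : Int)
  let stats := (PySem.List.pyRange 0 n).foldl
    (fun d i => pvStatsStep d (PySem.List.pyGetD creators i "")
      (PySem.List.pyGetD ids i "") (PySem.List.pyGetD views i 0)) PySem.Dict.empty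
  match PySem.List.max? (stats.values.map (fun s => s.1)) (fun x => x) with
  | none => []    -- max() of an empty sequence: Python raises ValueError; excluded by Pre_
  | some maxViews =>
    stats.items.foldl (fun res p => if p.2.1 == maxViews then res ++ [[p.1, p.2.2.1]] else res) []

-- ===== PORT B =====
def mostPopularCreator_alt (creators : List String) (ids : List String) (views : List Int) : List (List String) :=
  let order := PySem.List.dedup creators                     -- list(dict.fromkeys(creators))
  let totals := order.map (fun c =>
    (((creators.zip views).filter (fun p => p.1 == c)).map (fun p => p.2)).sum)
  match PySem.List.max? totals (fun x => x) with
  | none => []    -- max() of an empty sequence: Python raises ValueError; excluded by Pre_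
  | some maxViews =>
    (order.zip totals).foldl (fun res p =>
      if p.2 == maxViews then
        match PySem.List.min2? (((creators.zip (ids.zip views)).filter (fun q => q.1 == p.1)).map
            (fun q => (-q.2.2, q.2.1))) (fun x => x.1) (fun x => x.2) with
        | none => res   -- min() of an empty generator: unreachable, p.1 occurs in creators
        | some b => res ++ [[p.1, b.2]]
      else res) []

-- ===== PRECONDITION & SPEC =====
-- Pre_ excludes exactly the inputs on which Python A raises: creators = [] (ValueError from max()
-- of an empty sequence) and ids/views shorter than creators (IndexError in the loop).
def Pre_mostPopularCreator (creators : List String) (ids : List String) (views : List Int) : Prop :=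
  creators ≠ [] ∧ creators.length ≤ ids.length ∧ creators.length ≤ views.length
instance (creators : List String) (ids : List String) (views : List Int) : Decidable (Pre_mostPopularCreator creators ids views) := by unfold Pre_mostPopularCreator; infer_instance

def pvWitness_mostPopularCreator : List String × List String × List Int := (["alice", "bob", "alice"], ["one", "two", "three"], [5, 10, 5])

def Spec_mostPopularCreator (creators : List String) (ids : List String) (views : List Int) (out : List (List String)) : Prop := out = mostPopularCreator_alt creators ids views
instance (creators : List String) (ids : List String) (views : List Int) (out : List (List String)) : Decidable (Spec_mostPopularCreator creators ids views out) := by unfold Spec_mostPopularCreator; infer_instance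

-- ===== CLAIM (what is proved, stated in full; the proofs are below) =====
def Claim_equal_mostPopularCreator : Prop := ∀ (creators : List String) (ids : List String) (views : List Int), Dom_mostPopularCreator creators ids views → Pre_mostPopularCreator creators ids views → Spec_mostPopularCreator creators ids views (mostPopularCreator creators ids views)

-- ===== LEMMAS AND PROOFS =====

-- A's indexed loop over range(len(creators)) is the fold over the zipped triples.
theorem pv_foldA_zip {σ : Type} (creators ids : List String) (views : List Int)
    (h1 : creators.length ≤ ids.length) (h2 : creators.length ≤ views.length)
    (g : σ → String → String → Int → σ) (init : σ) :
    (PySem.List.pyRange 0 (creators.length : Int)).foldl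
      (fun d i => g d (PySem.List.pyGetD creators i "")
        (PySem.List.pyGetD ids i "") (PySem.List.pyGetD views i 0)) init
    = (creators.zip (ids.zip views)).foldl (fun d p => g d p.1 p.2.1 p.2.2) init := by
  have hL : (creators.zip (ids.zip views)).length = creators.length := by
    simp [List.length_zip]; omega
  have hfold := PySem.List.foldl_pyRange_pyGetD' (creators.zip (ids.zip views)) ("", ("", 0))
      (fun d p => g d p.1 p.2.1 p.2.2) init (le_refl 0)
  rw [Int.toNat_zero, List.drop_zero] at hfold
  rw [show ((creators.length : Int)) = ((creators.zip (ids.zip views)).length : Int) by rw [hL]]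
  rw [← hfold]
  apply PySem.List.foldl_congr_mem
  intro acc j hj
  obtain ⟨hj0, hj1⟩ := PySem.List.mem_pyRange_one.mp hj
  rw [hL] at hj1
  have hjc : j < ((creators.zip (ids.zip views)).length : Int) := by rw [hL]; exact hj1
  have hji : j < (ids.length : Int) := by
    have h1' : (creators.length : Int) ≤ (ids.length : Int) := by exact_mod_cast h1
    omega
  have hjv : j < (views.length : Int) := by
    have h2' : (creators.length : Int) ≤ (views.length : Int) := by exact_mod_cast h2
    omega
  rw [PySem.List.pyGetD_eq_getElem _ _ hj0 hjc, PySem.List.pyGetD_eq_getElem _ _ hj0 hj1,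
    PySem.List.pyGetD_eq_getElem _ _ hj0 hji, PySem.List.pyGetD_eq_getElem _ _ hj0 hjv]
  simp [List.getElem_zip]

theorem pv_zip_proj : ∀ (cs is' : List String) (vs : List Int), cs.length ≤ is'.length →
    (cs.zip (is'.zip vs)).map (fun p => (p.1, p.2.2)) = cs.zip vs := by
  intro cs
  induction cs with
  | nil => intro is' vs h; simp
  | cons c cs ih =>
    intro is' vs h
    cases is' with
    | nil => simp at h
    | cons i is' =>
      cases vs with
      | nil => simp
      | cons v vs => simpa using ih is' vs (by simpa using h)

-- the best-video update of A's loop, on the (best_id, best_view) component only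
def pvUpdB (b : String × Option Int) (vid : String) (v : Int) : String × Option Int :=
  match b.2 with
  | none => (vid, some v)
  | some m =>
    if m < v then (vid, some v)
    else if v = m ∧ vid < b.1 then (vid, some m)
    else (b.1, some m)

def pvUpd (s : Int × String × Option Int) (vid : String) (v : Int) : Int × String × Option Int :=
  (s.1 + v, pvUpdB s.2 vid v)

theorem pv_statsStep_eq (d : PySem.Dict String (Int × String × Option Int)) (c vid : String) (v : Int) :
    pvStatsStep d c vid v = d.insert c (pvUpd (d.getD c (0, "", none)) vid v) := rfl

-- per-creator entries of the zipped input and their aggregate under A's update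
def pvEnt (c : String) (L : List (String × String × Int)) : List (String × String × Int) :=
  L.filter (fun p => p.1 == c)

def pvAgg (c : String) (L : List (String × String × Int)) : Int × String × Option Int :=
  (pvEnt c L).foldl (fun s p => pvUpd s p.2.1 p.2.2) (0, "", none)

theorem pv_ent_append (c : String) (L : List (String × String × Int)) (e : String × String × Int) :
    pvEnt c (L ++ [e]) = pvEnt c L ++ if e.1 == c then [e] else [] := by
  simp only [pvEnt, List.filter_append]
  by_cases h : e.1 == c <;> simp [h]

theorem pv_agg_append (c : String) (L : List (String × String × Int)) (e : String × String × Int) :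
    pvAgg c (L ++ [e]) = if e.1 == c then pvUpd (pvAgg c L) e.2.1 e.2.2 else pvAgg c L := by
  simp only [pvAgg, pv_ent_append]
  by_cases h : e.1 == c <;> simp [h]

theorem pv_dedup_append (l : List String) (x : String) :
    PySem.List.dedup (l ++ [x])
      = if x ∈ PySem.List.dedup l then PySem.List.dedup l else PySem.List.dedup l ++ [x] := by
  show PySem.Set.ofList (l ++ [x]) = _
  rw [PySem.Set.ofList_append_singleton]
  simp [PySem.Set.add]

theorem pv_ent_nil_of_not_mem (c : String) (L : List (String × String × Int))
    (h : c ∉ L.map (fun p => p.1)) : pvEnt c L = [] := by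
  simp only [pvEnt, List.filter_eq_nil_iff]
  intro p hp
  simp only [beq_iff_eq]
  intro hc
  exact h (List.mem_map.mpr ⟨p, hp, hc⟩)

-- the characterisation of A's dict fold: items in first-appearance key order, values aggregated
theorem pv_items_char (L : List (String × String × Int)) :
    (L.foldl (fun d p => pvStatsStep d p.1 p.2.1 p.2.2) PySem.Dict.empty).items
      = (PySem.List.dedup (L.map (fun p => p.1))).map (fun c => (c, pvAgg c L)) := by
  induction L using List.reverseRecOn with
  | nil => simp [PySem.Dict.empty, PySem.List.dedup, PySem.Set.ofList, PySem.Set.empty]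
  | append_singleton L e ih =>
    set D := L.foldl (fun d p => pvStatsStep d p.1 p.2.1 p.2.2) PySem.Dict.empty with hD
    have hkeys : D.keys = PySem.List.dedup (L.map (fun p => p.1)) := by
      have hid : ((fun (x : String × (Int × String × Option Int)) => x.1)
          ∘ (fun c => (c, pvAgg c L))) = id := rfl
      simp only [PySem.Dict.keys, ih, List.map_map, hid, List.map_id]
    have hnodup : D.keys.Nodup := by rw [hkeys]; exact PySem.List.nodup_dedup _
    have hcont : D.contains e.1 = decide (e.1 ∈ PySem.List.dedup (L.map (fun p => p.1))) := by
      rw [PySem.Dict.contains_eq_decide_mem_keys, hkeys]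
    rw [List.foldl_append, List.foldl_cons, List.foldl_nil, ← hD, pv_statsStep_eq,
      List.map_append]
    simp only [List.map_cons, List.map_nil]
    rw [pv_dedup_append]
    by_cases hmem : e.1 ∈ PySem.List.dedup (L.map (fun p => p.1))
    · -- e.1 already a key: in-place update of its aggregate
      have hc : D.contains e.1 = true := by rw [hcont]; exact decide_eq_true hmem
      have hitem : (e.1, pvAgg e.1 L) ∈ D.items := by
        rw [ih]; exact List.mem_map.mpr ⟨e.1, hmem, rfl⟩
      have hgetD : D.getD e.1 (0, "", none) = pvAgg e.1 L :=
        PySem.Dict.getD_of_mem_items D hitem hnodup _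
      rw [PySem.Dict.items_insert_of_contains _ _ hc, if_pos hmem, ih, List.map_map, hgetD]
      apply List.map_congr_left
      intro c hc'
      by_cases hce : c = e.1
      · subst hce
        simp [Function.comp, pv_agg_append]
      · have h1 : (c == e.1) = false := by simpa using hce
        have h2 : (e.1 == c) = false := by simpa using Ne.symm hce
        simp [Function.comp, h1, pv_agg_append, h2]
    · -- new key: appended at the end
      have hc : D.contains e.1 = false := by rw [hcont]; exact decide_eq_false hmem
      have hentnil : pvEnt e.1 L = [] :=
        pv_ent_nil_of_not_mem e.1 L (fun h => hmem ((PySem.List.mem_dedup _ _).mpr h))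
      have hgetD : D.getD e.1 (0, "", none) = (0, "", none) :=
        PySem.Dict.getD_of_not_contains _ _ hc
      rw [PySem.Dict.items_insert_of_not_contains _ _ hc, if_neg hmem, ih, hgetD,
        List.map_append]
      congr 1
      · apply List.map_congr_left
        intro c hc'
        have hce : c ≠ e.1 := fun h => hmem (h ▸ hc')
        have h2 : (e.1 == c) = false := by simpa using Ne.symm hce
        simp [pv_agg_append, h2]
      · simp only [List.map_cons, List.map_nil, pv_agg_append, beq_self_eq_true, if_true,
          show pvAgg e.1 L = (0, "", none) from by
            simp only [pvAgg, hentnil, List.foldl_nil]]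

-- first component of the aggregate = sum of the creator's views
theorem pv_fold_fst (es : List (String × String × Int)) :
    ∀ (s : Int × String × Option Int),
    (es.foldl (fun s p => pvUpd s p.2.1 p.2.2) s).1 = s.1 + (es.map (fun p => p.2.2)).sum := by
  induction es with
  | nil => intro s; simp
  | cons e es ih =>
    intro s
    rw [List.foldl_cons, ih]
    simp [pvUpd]
    ring

theorem pv_agg_fst (c : String) (L : List (String × String × Int)) :
    (pvAgg c L).1 = ((pvEnt c L).map (fun p => p.2.2)).sum := by
  rw [pvAgg, pv_fold_fst]; simp

-- second component of the aggregate as a fold of pvUpdB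
theorem pv_fold_snd (es : List (String × String × Int)) :
    ∀ (s : Int × String × Option Int),
    (es.foldl (fun s p => pvUpd s p.2.1 p.2.2) s).2
      = es.foldl (fun b p => pvUpdB b p.2.1 p.2.2) s.2 := by
  induction es with
  | nil => intro s; rfl
  | cons e es ih => intro s; rw [List.foldl_cons, ih]; rfl

-- the min2? fold step (definitionally the body of PySem.List.min2? with identity pair keys)
def pvMinStep (acc : Option (Int × String)) (x : Int × String) : Option (Int × String) :=
  match acc with
  | none => some x
  | some m => if (decide (x.1 < m.1) || (!decide (m.1 < x.1) && decide (x.2 < m.2))) = true then some x else some m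

theorem pv_min2_eq_fold (xs : List (Int × String)) :
    PySem.List.min2? xs (fun x => x.1) (fun x => x.2) = xs.foldl pvMinStep none := by
  unfold PySem.List.min2?
  apply PySem.List.foldl_congr_mem
  intro acc x _
  cases acc with
  | none => rfl
  | some m => rfl

-- the simulation relation between A's best state and the tuple-min accumulator
def pvR (b : String × Option Int) (o : Option (Int × String)) : Prop :=
  (b.2 = none ∧ o = none) ∨ (∃ bv, b.2 = some bv ∧ o = some (-bv, b.1))

theorem pv_R_step (b : String × Option Int) (o : Option (Int × String)) (vid : String) (v : Int)
    (h : pvR b o) : pvR (pvUpdB b vid v) (pvMinStep o (-v, vid)) := by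
  rcases h with ⟨hb, ho⟩ | ⟨bv, hb, ho⟩
  · obtain ⟨b1, b2⟩ := b
    simp only at hb
    subst hb; subst ho
    exact Or.inr ⟨v, rfl, rfl⟩
  · obtain ⟨b1, b2⟩ := b
    simp only at hb
    subst hb; subst ho
    right
    simp only [pvUpdB, pvMinStep]
    by_cases h1 : bv < v
    · have hcond : (decide ((-v : Int) < -bv) || (!decide ((-bv : Int) < -v) && decide (vid < b1))) = true := by
        simp; omega
      rw [if_pos h1, hcond]
      exact ⟨v, rfl, by simp⟩
    · by_cases h2 : v = bv ∧ vid < b1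
      · have h2a : v = bv := h2.1
        have hcond : (decide ((-v : Int) < -bv) || (!decide ((-bv : Int) < -v) && decide (vid < b1))) = true := by
          rw [Bool.or_eq_true]
          right
          rw [Bool.and_eq_true, Bool.not_eq_true', decide_eq_false_iff_not, decide_eq_true_eq]
          exact ⟨by omega, h2.2⟩
        rw [if_neg h1, if_pos h2, hcond]
        exact ⟨bv, rfl, by simp [h2a]⟩
      · have hcond : (decide ((-v : Int) < -bv) || (!decide ((-bv : Int) < -v) && decide (vid < b1))) = false := by
          rw [Bool.or_eq_false_iff, Bool.and_eq_false_iff]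
          refine ⟨by simp only [decide_eq_false_iff_not]; omega, ?_⟩
          by_cases hv : v = bv
          · right
            simp only [decide_eq_false_iff_not]
            intro hvb
            exact h2 ⟨hv, hvb⟩
          · left
            rw [Bool.not_eq_false']
            simp only [decide_eq_true_eq]
            omega
        rw [if_neg h1, if_neg h2, hcond]
        exact ⟨bv, rfl, rfl⟩

theorem pv_R_fold (es : List (String × String × Int)) :
    ∀ (b : String × Option Int) (o : Option (Int × String)), pvR b o →
    pvR (es.foldl (fun b p => pvUpdB b p.2.1 p.2.2) b)
      ((es.map (fun p => (-p.2.2, p.2.1))).foldl pvMinStep o) := by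
  induction es with
  | nil => intro b o h; exact h
  | cons e es ih =>
    intro b o h
    exact ih _ _ (pv_R_step b o e.2.1 e.2.2 h)

theorem pv_minStep_some (xs : List (Int × String)) :
    ∀ (m : Int × String), ∃ r, xs.foldl pvMinStep (some m) = some r := by
  induction xs with
  | nil => intro m; exact ⟨m, rfl⟩
  | cons x xs ih =>
    intro m
    have hsome : ∃ m', pvMinStep (some m) x = some m' := by
      simp only [pvMinStep]
      split
      · exact ⟨x, rfl⟩
      · exact ⟨m, rfl⟩
    obtain ⟨m', hm'⟩ := hsome
    rw [List.foldl_cons, hm']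
    exact ih m'

-- for a nonempty entry list: A's aggregate carries some best view, and the tuple-min names it
theorem pv_best_char (es : List (String × String × Int)) (hne : es ≠ []) :
    ∃ bi bv, (es.foldl (fun b p => pvUpdB b p.2.1 p.2.2) ("", (none : Option Int))) = (bi, some bv)
      ∧ (es.map (fun p => (-p.2.2, p.2.1))).foldl pvMinStep none = some (-bv, bi) := by
  have hR := pv_R_fold es ("", none) none (Or.inl ⟨rfl, rfl⟩)
  have hsome : ∃ r, (es.map (fun p => (-p.2.2, p.2.1))).foldl pvMinStep none = some r := by
    cases es with
    | nil => exact absurd rfl hne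
    | cons e es =>
      simp only [List.map_cons, List.foldl_cons]
      exact pv_minStep_some _ _
  obtain ⟨r, hr⟩ := hsome
  rcases hR with ⟨_, ho⟩ | ⟨bv, hb, ho⟩
  · rw [hr] at ho; exact absurd ho (by simp)
  · exact ⟨(es.foldl (fun b p => pvUpdB b p.2.1 p.2.2) ("", none)).1, bv,
      Prod.ext_iff.mpr ⟨rfl, hb⟩, ho⟩

theorem pv_ent_ne_nil (c : String) (L : List (String × String × Int))
    (h : c ∈ L.map (fun p => p.1)) : pvEnt c L ≠ [] := by
  obtain ⟨p, hp, hc⟩ := List.mem_map.mp h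
  have : p ∈ pvEnt c L := by
    simp only [pvEnt, List.mem_filter]
    exact ⟨hp, by simp [hc]⟩
  exact List.ne_nil_of_mem this

-- ===== VERDICT (by name: the statement is the Claim_ definition above) =====
theorem mostPopularCreator_spec : Claim_equal_mostPopularCreator := by
  intro creators ids views _ hpre
  obtain ⟨hne, h1, h2⟩ := hpre
  unfold Spec_mostPopularCreator
  simp only [mostPopularCreator, mostPopularCreator_alt]
  rw [pv_foldA_zip creators ids views h1 h2]
  set L := creators.zip (ids.zip views) with hLdef
  have hmap1 : L.map (fun p => p.1) = creators := by
    rw [hLdef, show (fun (p : String × String × Int) => p.1) = Prod.fst from rfl,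
      List.map_fst_zip]
    simp [List.length_zip]; omega
  have hitems := pv_items_char L
  rw [hmap1] at hitems
  set order := PySem.List.dedup creators with horder
  -- A's max argument = B's totals list
  have hvals : (L.foldl (fun d p => pvStatsStep d p.1 p.2.1 p.2.2) PySem.Dict.empty).values.map
      (fun s => s.1)
      = order.map (fun c =>
          (((creators.zip views).filter (fun p => p.1 == c)).map (fun p => p.2)).sum) := by
    simp only [PySem.Dict.values, hitems, List.map_map]
    apply List.map_congr_left
    intro c hc
    show (pvAgg c L).1 = _
    rw [pv_agg_fst]
    have hzv : creators.zip views = L.map (fun p => (p.1, p.2.2)) :=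
      (pv_zip_proj creators ids views h1).symm
    rw [hzv, List.filter_map, List.map_map]
    congr 1
  rw [hvals]
  cases hM : PySem.List.max? (order.map (fun c =>
      (((creators.zip views).filter (fun p => p.1 == c)).map (fun p => p.2)).sum)) (fun x => x) with
  | none => rfl
  | some M =>
    simp only []
    -- A's output loop: append-if over the characterised items list
    rw [hitems,
      PySem.List.foldl_append_if (fun p => p.2.1 == M) (fun p => [p.1, p.2.2.1])
        (order.map (fun c => (c, pvAgg c L))) [],
      List.filter_map, List.map_map, List.nil_append]
    -- B's output loop: rewrite the zip as a map over order, then fold over the map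
    have hzip : order.zip (order.map (fun c =>
        (((creators.zip views).filter (fun p => p.1 == c)).map (fun p => p.2)).sum))
        = order.map (fun c => (c,
            (((creators.zip views).filter (fun p => p.1 == c)).map (fun p => p.2)).sum)) := by
      exact List.map_prod_left_eq_zip.symm
    rw [hzip, List.foldl_map]
    -- pointwise: for c ∈ order the min2? is some and names A's best id
    have hbody : ∀ (c : String), c ∈ order → ∀ (acc : List (List String)),
        (fun (acc : List (List String)) (c : String) =>
          (if ((c, (((creators.zip views).filter (fun p => p.1 == c)).map
                (fun p => p.2)).sum)).2 == M then
            match PySem.List.min2? (((creators.zip (ids.zip views)).filter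
                (fun q => q.1 == (c, (((creators.zip views).filter (fun p => p.1 == c)).map
                  (fun p => p.2)).sum).1)).map
                (fun q => (-q.2.2, q.2.1))) (fun x => x.1) (fun x => x.2) with
            | none => acc
            | some b => acc ++ [[(c, (((creators.zip views).filter (fun p => p.1 == c)).map
                (fun p => p.2)).sum).1, b.2]]
          else acc)) acc c
        = (fun (acc : List (List String)) (c : String) =>
            if (pvAgg c L).1 == M then acc ++ [[c, (pvAgg c L).2.1]] else acc) acc c := by
      intro c hc acc
      simp only []
      have hcmem : c ∈ creators := (PySem.List.mem_dedup _ _).mp hc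
      have hcL : c ∈ L.map (fun p => p.1) := by rw [hmap1]; exact hcmem
      have hent := pv_ent_ne_nil c L hcL
      obtain ⟨bi, bv, hfold, hmin⟩ := pv_best_char (pvEnt c L) hent
      have htot : (((creators.zip views).filter (fun p => p.1 == c)).map (fun p => p.2)).sum
          = (pvAgg c L).1 := by
        rw [pv_agg_fst]
        have hzv : creators.zip views = L.map (fun p => (p.1, p.2.2)) :=
          (pv_zip_proj creators ids views h1).symm
        rw [hzv, List.filter_map, List.map_map]
        congr 1
      have hsnd : (pvAgg c L).2 = (bi, some bv) := by
        rw [pvAgg, pv_fold_snd]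
        exact hfold
      have hminL : PySem.List.min2? ((pvEnt c L).map (fun q => (-q.2.2, q.2.1)))
          (fun x => x.1) (fun x => x.2) = some (-bv, bi) := by
        rw [pv_min2_eq_fold]; exact hmin
      have hentL : (creators.zip (ids.zip views)).filter (fun q => q.1 == c) = pvEnt c L := rfl
      rw [htot, hentL, hminL]
      by_cases hMc : ((pvAgg c L).1 == M) = true <;> simp [hMc, hsnd]
    refine Eq.symm ((PySem.List.foldl_congr_mem' order _ _ ([] : List (List String))
      hbody).trans ?_)
    rw [PySem.List.foldl_append_if (fun c => (pvAgg c L).1 == M)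
      (fun c => [c, (pvAgg c L).2.1]) order []]
    simp [Function.comp_def]
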